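-- pv_equiv track=rewrite | github.com/rorrxr/codingTest | 백준/Silver/1388. 바닥 장식/바닥 장식.py | count_wood_panels
-- ===== SOURCE A (Python) =====
-- def count_wood_panels(n, m, floor):
--     # 방문 여부를 기록하기 위한 2차원 리스트 (False로 초기화)
--     visited = [[False] * m for _ in range(n)]
--     count = 0  # 나무판자의 개수를 셀 변수
--
--     # 가로 탐색
--     for i in range(n):  # 행 탐색
--         for j in range(m):  # 열 탐색
--             # 아직 방문하지 않았고 현재 위치가 '-'라면
--             if not visited[i][j] and floor[i][j] == '-':
--                 # 새로운 가로 나무판자 발견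
--                 count += 1  # 나무판자 개수 증가
--                 k = j  # 현재 열부터 시작
--
--                 # 현재 행에서 연속된 '-'를
--                 while k < m and floor[i][k] == '-':
--                     # 모두 방문 True 처리
--                     visited[i][k] = True
--                     k += 1  # 오른쪽으로 이동
--
--     # 세로 방향 탐색
--     for i in range(n):  # 행 탐색
--         for j in range(m):  # 열 탐색
--             # 아직 방문하지 않았고 현재 위치가 '|'라면
--             if not visited[i][j] and floor[i][j] == '|':
--                 # 새로운 세로 나무판자 발견
--                 count += 1  # 나무판자 개수 증가
--                 k = i  # 현재 행부터 시작
--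
--                 # 현재 열에서 연속된 '|'를
--                 while k < n and floor[k][j] == '|':
--                     # 모두 방문 True 처리
--                     visited[k][j] = True
--                     k += 1  # 아래쪽으로 이동
--
--     return count  # 나무판자의 총 개수를 반환
-- ===== SOURCE B (Python) =====
-- def count_wood_panels(n, m, floor):
--     horiz = sum(1 for i in range(n) for j in range(m)
--                 if floor[i][j] == '-' and (j == 0 or floor[i][j - 1] != '-'))
--     vert = sum(1 for i in range(n) for j in range(m)
--                if floor[i][j] == '|' and (i == 0 or floor[i - 1][j] != '|'))
--     return horiz + vert
-- ===== Notes on version B (the rewrite author's own statement) =====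
-- stated objective: simpler
-- what changed: Drops the visited matrix and the inner while-loop flood-marking entirely; counts a panel exactly at each run start, detected by comparing a cell with its left/upper neighbour.
import Mathlib
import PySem

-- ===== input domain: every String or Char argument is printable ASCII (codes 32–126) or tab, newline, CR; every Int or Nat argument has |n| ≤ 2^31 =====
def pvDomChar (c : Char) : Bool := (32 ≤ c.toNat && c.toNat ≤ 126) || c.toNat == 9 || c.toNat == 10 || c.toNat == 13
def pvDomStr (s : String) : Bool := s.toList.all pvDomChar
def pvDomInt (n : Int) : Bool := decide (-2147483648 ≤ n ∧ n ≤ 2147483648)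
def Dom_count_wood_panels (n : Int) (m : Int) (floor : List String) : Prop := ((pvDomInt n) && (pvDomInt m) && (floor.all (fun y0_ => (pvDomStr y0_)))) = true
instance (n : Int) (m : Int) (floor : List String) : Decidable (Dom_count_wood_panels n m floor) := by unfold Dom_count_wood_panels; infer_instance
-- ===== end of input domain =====

-- B drops A's visited matrix and inner while-loop flood-marking, counting one panel per run
-- start detected by comparing each cell with its left/upper neighbour (objective: simpler).

-- ===== PORT A =====
-- grid access shared by both ports: floor[i][j]; total via defaults, exact on in-range indices
-- (inside Pre_ every access the Python performs is in range)
def pvCell (floor : List String) (i j : Nat) : Char :=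
  ((floor.getD i "").toList.getD j ' ')

-- the horizontal `while k < m and floor[i][k] == '-'` marking loop, on visited row `v`
def pvMarkH (floor : List String) (M i : Nat) (k : Nat) (v : List Bool) : List Bool :=
  if _h : k < M then
    if pvCell floor i k = '-' then pvMarkH floor M i (k + 1) (v.set k true) else v
  else v
termination_by M - k

-- the vertical `while k < n and floor[k][j] == '|'` marking loop, on the visited matrix
def pvMarkV (floor : List String) (N j : Nat) (k : Nat) (vis : List (List Bool)) : List (List Bool) :=
  if _h : k < N then
    if pvCell floor k j = '|' then pvMarkV floor N j (k + 1) (vis.modify k (fun r => r.set j true)) else vis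
  else vis
termination_by N - k

-- body of the horizontal double loop at cell (i, j)
def pvHStep (floor : List String) (M i : Nat) (st : Int × List (List Bool)) (j : Nat) : Int × List (List Bool) :=
  if ¬ ((st.2.getD i []).getD j false = true) ∧ pvCell floor i j = '-' then
    (st.1 + 1, st.2.modify i (fun r => pvMarkH floor M i j r))
  else st

-- body of the vertical double loop at cell (i, j)
def pvVStep (floor : List String) (N i : Nat) (st : Int × List (List Bool)) (j : Nat) : Int × List (List Bool) :=
  if ¬ ((st.2.getD i []).getD j false = true) ∧ pvCell floor i j = '|' then
    (st.1 + 1, pvMarkV floor N j i st.2)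
  else st

def count_wood_panels (n : Int) (m : Int) (floor : List String) : Int :=
  let N := n.toNat
  let M := m.toNat
  let vis0 := (List.range N).map (fun _ => List.replicate M false)
  let st1 := (List.range N).foldl (fun st i => (List.range M).foldl (pvHStep floor M i) st) ((0 : Int), vis0)
  let st2 := (List.range N).foldl (fun st i => (List.range M).foldl (pvVStep floor N i) st) st1
  st2.1

-- ===== PORT B =====
def count_wood_panels_alt (n : Int) (m : Int) (floor : List String) : Int :=
  let N := n.toNat
  let M := m.toNat
  let horiz := (List.range N).foldl (fun acc i => (List.range M).foldl
      (fun x j => if pvCell floor i j = '-' ∧ (j = 0 ∨ pvCell floor i (j - 1) ≠ '-') then x + 1 else x) acc) (0 : Int)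
  let vert := (List.range N).foldl (fun acc i => (List.range M).foldl
      (fun x j => if pvCell floor i j = '|' ∧ (i = 0 ∨ pvCell floor (i - 1) j ≠ '|') then x + 1 else x) acc) (0 : Int)
  horiz + vert

-- ===== PRECONDITION & SPEC =====
-- Pre_ excludes exactly the inputs where the Python A raises IndexError: when both loops run
-- (n > 0 and m > 0), each of the first n rows must exist and have at least m characters.
def Pre_count_wood_panels (n : Int) (m : Int) (floor : List String) : Prop :=
  0 < n → 0 < m → (n ≤ (floor.length : Int) ∧ ∀ row ∈ floor.take n.toNat, m ≤ (row.toList.length : Int))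

instance (n : Int) (m : Int) (floor : List String) : Decidable (Pre_count_wood_panels n m floor) := by
  unfold Pre_count_wood_panels; infer_instance

def pvWitness_count_wood_panels : Int × Int × List String := (2, 3, ["--|", "||-"])

def Spec_count_wood_panels (n : Int) (m : Int) (floor : List String) (out : Int) : Prop := out = count_wood_panels_alt n m floor
instance (n : Int) (m : Int) (floor : List String) (out : Int) : Decidable (Spec_count_wood_panels n m floor out) := by
  unfold Spec_count_wood_panels; infer_instance

-- ===== CLAIM (what is proved, stated in full; the proofs are below) =====
def Claim_equal_count_wood_panels : Prop := ∀ (n : Int) (m : Int) (floor : List String), Dom_count_wood_panels n m floor → Pre_count_wood_panels n m floor → Spec_count_wood_panels n m floor (count_wood_panels n m floor)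

-- ===== LEMMAS AND PROOFS =====

-- visited-matrix entry (false off the matrix), shape, runs of '-' / '|', and coverage predicates
def pvVisAt (vis : List (List Bool)) (r c : Nat) : Bool := (vis.getD r []).getD c false

def pvShape (N M : Nat) (vis : List (List Bool)) : Prop :=
  vis.length = N ∧ ∀ r, r < N → (vis.getD r []).length = M

def pvRunH (floor : List String) (i s e : Nat) : Prop := ∀ t, s ≤ t → t ≤ e → pvCell floor i t = '-'
def pvRunV (floor : List String) (j s e : Nat) : Prop := ∀ t, s ≤ t → t ≤ e → pvCell floor t j = '|'

-- cell (i,c) is marked after the horizontal pass has examined columns < j of row i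
def pvCovH (floor : List String) (i j c : Nat) : Prop := ∃ s, s < j ∧ s ≤ c ∧ pvRunH floor i s c
-- cell (r,c) is marked by the vertical pass once it has examined cells (< i, _) and (i, < j)
def pvCovV (floor : List String) (i j r c : Nat) : Prop :=
  ∃ s, (s < i ∨ (s = i ∧ c < j)) ∧ s ≤ r ∧ pvRunV floor c s r

lemma pvGetD_set (v : List Bool) (k c : Nat) :
    (v.set k true).getD c false = if c = k ∧ k < v.length then true else v.getD c false := by
  simp only [List.getD_eq_getElem?_getD, List.getElem?_set]
  split_ifs with h1 h2 h3 h4 <;> simp_all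

lemma pvGetD_modify (vis : List (List Bool)) (i r : Nat) (f : List Bool → List Bool) :
    (vis.modify i f).getD r [] = if r = i ∧ i < vis.length then f (vis.getD r []) else vis.getD r [] := by
  simp only [List.getD_eq_getElem?_getD, List.getElem?_modify]
  rcases Nat.lt_or_ge r vis.length with hr | hr
  · rw [List.getElem?_eq_getElem hr]
    by_cases h : i = r
    · subst h; simp [hr]
    · have : ¬ (r = i ∧ i < vis.length) := by omega
      simp [h, this]
  · rw [List.getElem?_eq_none (by omega)]
    have h2 : vis[r]? = none := List.getElem?_eq_none (by omega)
    (by_cases h : r = i ∧ i < vis.length <;> simp [h]); omega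

lemma pvMarkH_length (floor : List String) (M i k : Nat) (v : List Bool) :
    (pvMarkH floor M i k v).length = v.length := by
  fun_induction pvMarkH <;> simp_all

lemma pvMarkH_getD_aux (floor : List String) (M i : Nat) :
    ∀ (fuel k : Nat), M ≤ k + fuel → ∀ (v : List Bool), v.length = M → ∀ c,
      ((pvMarkH floor M i k v).getD c false = true ↔
        (v.getD c false = true ∨ (k ≤ c ∧ c < M ∧ pvRunH floor i k c))) := by
  intro fuel
  induction fuel with
  | zero =>
    intro k hk v hv c
    rw [pvMarkH]
    simp only [dif_neg (by omega : ¬ k < M)]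
    have : ¬ (k ≤ c ∧ c < M ∧ pvRunH floor i k c) := by rintro ⟨h1, h2, -⟩; omega
    tauto
  | succ fuel ih =>
    intro k hk v hv c
    rw [pvMarkH]
    split_ifs with h hc
    · have hv' : (v.set k true).length = M := by simp [hv]
      rw [ih (k + 1) (by omega) (v.set k true) hv' c, pvGetD_set]
      by_cases hck : c = k
      · subst hck
        constructor
        · intro _
          refine Or.inr ⟨le_refl c, h, fun t h1 h2 => ?_⟩
          have ht : t = c := by omega
          rw [ht]; exact hc
        · intro _
          exact Or.inl (by rw [if_pos ⟨rfl, by omega⟩])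
      · rw [if_neg (by tauto)]
        constructor
        · rintro (hvv | ⟨h1, h2, hr⟩)
          · exact Or.inl hvv
          · exact Or.inr ⟨by omega, h2, fun t h1t h2t => by
              by_cases htk : t = k
              · simpa [htk] using hc
              · exact hr t (by omega) h2t⟩
        · rintro (hvv | ⟨h1, h2, hr⟩)
          · exact Or.inl hvv
          · exact Or.inr ⟨by omega, h2, fun t h1t h2t => hr t (by omega) h2t⟩
    · have : ¬ (k ≤ c ∧ c < M ∧ pvRunH floor i k c) := by
        rintro ⟨h1, h2, hr⟩
        exact hc (hr k (le_refl k) h1)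
      tauto
    · have : ¬ (k ≤ c ∧ c < M ∧ pvRunH floor i k c) := by rintro ⟨h1, h2, -⟩; omega
      tauto

lemma pvMarkH_getD (floor : List String) (M i : Nat) (k : Nat) (v : List Bool)
    (hv : v.length = M) (c : Nat) :
    ((pvMarkH floor M i k v).getD c false = true ↔
      (v.getD c false = true ∨ (k ≤ c ∧ c < M ∧ pvRunH floor i k c))) :=
  pvMarkH_getD_aux floor M i M k (by omega) v hv c

lemma pvMarkV_shape_aux (floor : List String) (N M j : Nat) :
    ∀ (fuel k : Nat), N ≤ k + fuel → ∀ (vis : List (List Bool)),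
      pvShape N M vis → pvShape N M (pvMarkV floor N j k vis) := by
  intro fuel
  induction fuel with
  | zero =>
    intro k hk vis hsh
    rw [pvMarkV]
    simp only [dif_neg (by omega : ¬ k < N)]
    exact hsh
  | succ fuel ih =>
    intro k hk vis hsh
    rw [pvMarkV]
    split_ifs with h hc
    · refine ih (k + 1) (by omega) _ ⟨by simpa using hsh.1, fun r hr => ?_⟩
      rw [pvGetD_modify]
      split_ifs with h2
      · simpa using hsh.2 r hr
      · exact hsh.2 r hr
    · exact hsh
    · exact hsh

lemma pvMarkV_shape (floor : List String) (N M j k : Nat) (vis : List (List Bool))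
    (h : pvShape N M vis) : pvShape N M (pvMarkV floor N j k vis) :=
  pvMarkV_shape_aux floor N M j N k (by omega) vis h

lemma pvMarkV_visAt (floor : List String) (N M j : Nat) (hj : j < M) :
    ∀ (k : Nat) (vis : List (List Bool)), pvShape N M vis → ∀ r c,
      (pvVisAt (pvMarkV floor N j k vis) r c = true ↔
        (pvVisAt vis r c = true ∨ (c = j ∧ k ≤ r ∧ r < N ∧ pvRunV floor j k r))) := by
  have main : ∀ (fuel k : Nat), N ≤ k + fuel → ∀ (vis : List (List Bool)), pvShape N M vis → ∀ r c,
      (pvVisAt (pvMarkV floor N j k vis) r c = true ↔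
        (pvVisAt vis r c = true ∨ (c = j ∧ k ≤ r ∧ r < N ∧ pvRunV floor j k r))) := by
    intro fuel
    induction fuel with
    | zero =>
      intro k hk vis hsh r c
      rw [pvMarkV]
      simp only [dif_neg (by omega : ¬ k < N)]
      have : ¬ (c = j ∧ k ≤ r ∧ r < N ∧ pvRunV floor j k r) := by rintro ⟨-, h1, h2, -⟩; omega
      tauto
    | succ fuel ih =>
      intro k hk vis hsh r c
      rw [pvMarkV]
      split_ifs with h hc
      · have hsh' : pvShape N M (vis.modify k fun row => row.set j true) := by
          refine ⟨by simpa using hsh.1, fun r' hr' => ?_⟩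
          rw [pvGetD_modify]
          split_ifs with h2
          · simpa using hsh.2 r' hr'
          · exact hsh.2 r' hr'
        rw [ih (k + 1) (by omega) _ hsh' r c]
        unfold pvVisAt
        rw [pvGetD_modify]
        by_cases hrk : r = k
        · subst hrk
          rw [if_pos ⟨rfl, by rw [hsh.1]; omega⟩, pvGetD_set]
          by_cases hcj : c = j
          · subst hcj
            constructor
            · intro _
              refine Or.inr ⟨rfl, le_refl r, by omega, fun t h1 h2 => ?_⟩
              have ht : t = r := by omega
              rw [ht]; exact hc
            · intro _
              exact Or.inl (by rw [if_pos ⟨rfl, by rw [hsh.2 r (by omega)]; exact hj⟩])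
          · rw [if_neg (by tauto)]
            constructor
            · rintro (hv | ⟨hcj', -⟩)
              · exact Or.inl hv
              · exact absurd hcj' hcj
            · rintro (hv | ⟨hcj', -⟩)
              · exact Or.inl hv
              · exact absurd hcj' hcj
        · rw [if_neg (by tauto)]
          constructor
          · rintro (hv | ⟨hcj, h1, h2, hr⟩)
            · exact Or.inl hv
            · exact Or.inr ⟨hcj, by omega, h2, fun t h1t h2t => by
                by_cases htk : t = k
                · simpa [htk] using hc
                · exact hr t (by omega) h2t⟩
          · rintro (hv | ⟨hcj, h1, h2, hr⟩)
            · exact Or.inl hv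
            · exact Or.inr ⟨hcj, by omega, h2, fun t h1t h2t => hr t (by omega) h2t⟩
      · have : ¬ (c = j ∧ k ≤ r ∧ r < N ∧ pvRunV floor j k r) := by
          rintro ⟨-, h1, h2, hr⟩
          exact hc (hr k (le_refl k) h1)
        tauto
      · have : ¬ (c = j ∧ k ≤ r ∧ r < N ∧ pvRunV floor j k r) := by rintro ⟨-, h1, h2, -⟩; omega
        tauto
  intro k
  exact main N k (by omega)

-- coverage-predicate arithmetic
lemma pvCovH_zero (floor : List String) (i c : Nat) : ¬ pvCovH floor i 0 c := by
  rintro ⟨s, hs, -, -⟩; omega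

lemma pvCovH_succ (floor : List String) (i j c : Nat) :
    pvCovH floor i (j + 1) c ↔ pvCovH floor i j c ∨ (j ≤ c ∧ pvRunH floor i j c) := by
  constructor
  · rintro ⟨s, hs, hsc, hr⟩
    by_cases hsj : s < j
    · exact Or.inl ⟨s, hsj, hsc, hr⟩
    · have : s = j := by omega
      subst this
      exact Or.inr ⟨hsc, hr⟩
  · rintro (⟨s, hs, hsc, hr⟩ | ⟨hjc, hr⟩)
    · exact ⟨s, by omega, hsc, hr⟩
    · exact ⟨j, by omega, hjc, hr⟩

lemma pvCovH_self (floor : List String) (i j : Nat) :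
    pvCovH floor i j j ↔ (0 < j ∧ pvCell floor i (j - 1) = '-' ∧ pvCell floor i j = '-') := by
  constructor
  · rintro ⟨s, hs, hsj, hr⟩
    exact ⟨by omega, hr (j - 1) (by omega) (by omega), hr j hsj (le_refl j)⟩
  · rintro ⟨hj, h1, h2⟩
    refine ⟨j - 1, by omega, by omega, fun t ht1 ht2 => ?_⟩
    have : t = j - 1 ∨ t = j := by omega
    rcases this with h | h <;> rw [h] <;> assumption

lemma pvCovH_absorb (floor : List String) (i j c : Nat) (hsel : pvCovH floor i j j)
    (hle : j ≤ c) (hrun : pvRunH floor i j c) : pvCovH floor i j c := by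
  obtain ⟨s, hs, hsj, hr⟩ := hsel
  refine ⟨s, hs, by omega, fun t ht1 ht2 => ?_⟩
  by_cases htj : t ≤ j
  · exact hr t ht1 htj
  · exact hrun t (by omega) ht2

lemma pvCovH_total (floor : List String) (i M c : Nat) (hc : c < M) :
    pvCovH floor i M c ↔ pvCell floor i c = '-' := by
  constructor
  · rintro ⟨s, hs, hsc, hr⟩
    exact hr c hsc (le_refl c)
  · intro h
    refine ⟨c, hc, le_refl c, fun t ht1 ht2 => ?_⟩
    have : t = c := by omega
    rw [this]; exact h

lemma pvCovV_zero (floor : List String) (r c : Nat) : ¬ pvCovV floor 0 0 r c := by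
  rintro ⟨s, hs, -, -⟩; omega

lemma pvCovV_succ (floor : List String) (i j r c : Nat) :
    pvCovV floor i (j + 1) r c ↔ pvCovV floor i j r c ∨ (c = j ∧ i ≤ r ∧ pvRunV floor j i r) := by
  constructor
  · rintro ⟨s, hs, hsr, hr⟩
    rcases hs with hs | ⟨hs, hcj⟩
    · exact Or.inl ⟨s, Or.inl hs, hsr, hr⟩
    · by_cases hcj' : c < j
      · exact Or.inl ⟨s, Or.inr ⟨hs, hcj'⟩, hsr, hr⟩
      · have hc : c = j := by omega
        subst hc hs
        exact Or.inr ⟨rfl, hsr, hr⟩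
  · rintro (⟨s, hs, hsr, hr⟩ | ⟨hcj, hir, hr⟩)
    · refine ⟨s, ?_, hsr, hr⟩; omega
    · subst hcj
      exact ⟨i, Or.inr ⟨rfl, by omega⟩, hir, hr⟩

lemma pvCovV_self (floor : List String) (i j : Nat) :
    pvCovV floor i j i j ↔ (0 < i ∧ pvCell floor (i - 1) j = '|' ∧ pvCell floor i j = '|') := by
  constructor
  · rintro ⟨s, hs, hsi, hr⟩
    have hs' : s < i := by omega
    exact ⟨by omega, hr (i - 1) (by omega) (by omega), hr i hsi (le_refl i)⟩
  · rintro ⟨hi, h1, h2⟩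
    refine ⟨i - 1, Or.inl (by omega), by omega, fun t ht1 ht2 => ?_⟩
    have : t = i - 1 ∨ t = i := by omega
    rcases this with h | h <;> rw [h] <;> assumption

lemma pvCovV_absorb (floor : List String) (i j r : Nat) (hsel : pvCovV floor i j i j)
    (hle : i ≤ r) (hrun : pvRunV floor j i r) : pvCovV floor i j r j := by
  obtain ⟨s, hs, hsi, hr⟩ := hsel
  have hs' : s < i := by omega
  refine ⟨s, Or.inl hs', by omega, fun t ht1 ht2 => ?_⟩
  by_cases hti : t ≤ i
  · exact hr t ht1 hti
  · exact hrun t (by omega) ht2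

lemma pvCovV_rollover (floor : List String) (i M r c : Nat) (hc : c < M) :
    pvCovV floor i M r c ↔ pvCovV floor (i + 1) 0 r c := by
  constructor
  · rintro ⟨s, hs, hsr, hr⟩
    refine ⟨s, Or.inl (by omega), hsr, hr⟩
  · rintro ⟨s, hs, hsr, hr⟩
    refine ⟨s, ?_, hsr, hr⟩; omega

-- accumulator shifting for counting folds
lemma pvFoldl_shift (f : Int → Nat → Int) (h : ∀ a t, f a t = a + f 0 t) :
    ∀ (l : List Nat) (a : Int), l.foldl f a = a + l.foldl f 0 := by
  intro l
  induction l with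
  | nil => intro a; simp
  | cons x l ih =>
    intro a
    simp only [List.foldl_cons]
    rw [ih (f a x), ih (f 0 x), h a x]
    ring

-- the horizontal inner loop over row i
lemma pvHInner (floor : List String) (N M i : Nat) (hi : i < N) (j : Nat) (hj : j ≤ M)
    (a : Int) (vis : List (List Bool)) (hsh : pvShape N M vis)
    (hoth : ∀ r c, r ≠ i → (pvVisAt vis r c = true ↔ (r < i ∧ c < M ∧ pvCell floor r c = '-')))
    (hrow : ∀ c, pvVisAt vis i c = false) :
    ((List.range j).foldl (pvHStep floor M i) (a, vis)).1
        = (List.range j).foldl (fun x t => if pvCell floor i t = '-' ∧ (t = 0 ∨ pvCell floor i (t - 1) ≠ '-') then x + 1 else x) a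
      ∧ pvShape N M ((List.range j).foldl (pvHStep floor M i) (a, vis)).2
      ∧ (∀ r c, r ≠ i → (pvVisAt ((List.range j).foldl (pvHStep floor M i) (a, vis)).2 r c = true ↔ (r < i ∧ c < M ∧ pvCell floor r c = '-')))
      ∧ (∀ c, pvVisAt ((List.range j).foldl (pvHStep floor M i) (a, vis)).2 i c = true ↔ (c < M ∧ pvCovH floor i j c)) := by
  induction j with
  | zero =>
    simp only [List.range_zero, List.foldl_nil]
    refine ⟨by trivial, hsh, hoth, fun c => ?_⟩
    rw [hrow c]
    simp only [Bool.false_eq_true, false_iff]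
    rintro ⟨-, h⟩
    exact pvCovH_zero floor i c h
  | succ j ih =>
    obtain ⟨hcnt, hsh', hoth', hrow'⟩ := ih (by omega)
    simp only [List.range_succ, List.foldl_append, List.foldl_cons, List.foldl_nil]
    set st := (List.range j).foldl (pvHStep floor M i) (a, vis) with hstdef
    have hjM : j < M := by omega
    rw [pvHStep]
    by_cases hc : pvCell floor i j = '-'
    · by_cases hv : pvVisAt st.2 i j = true
      · -- already visited: inside a run started earlier
        have hcov : pvCovH floor i j j := ((hrow' j).mp hv).2
        have hself := (pvCovH_self floor i j).mp hcov
        rw [if_neg (fun hcond => absurd hv hcond.1)]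
        rw [if_neg (by rintro ⟨-, h0 | hne⟩ <;> first | omega | exact hne hself.2.1)]
        refine ⟨hcnt, hsh', hoth', fun c => ?_⟩
        rw [hrow' c, pvCovH_succ]
        constructor
        · rintro ⟨hcM, hcv⟩; exact ⟨hcM, Or.inl hcv⟩
        · rintro ⟨hcM, hcv | ⟨hjc, hr⟩⟩
          · exact ⟨hcM, hcv⟩
          · exact ⟨hcM, pvCovH_absorb floor i j c hcov hjc hr⟩
      · -- new run start
        have hnc : ¬ pvCovH floor i j j := fun h => hv ((hrow' j).mpr ⟨hjM, h⟩)
        have hstart : j = 0 ∨ pvCell floor i (j - 1) ≠ '-' := by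
          by_cases h0 : j = 0
          · exact Or.inl h0
          · refine Or.inr fun hprev => hnc ((pvCovH_self floor i j).mpr ⟨by omega, hprev, hc⟩)
        rw [if_pos (show ¬ (st.2.getD i []).getD j false = true ∧ pvCell floor i j = '-' from ⟨hv, hc⟩), if_pos ⟨hc, hstart⟩]
        have hiN : i < st.2.length := by rw [hsh'.1]; exact hi
        have hrowlen : (st.2.getD i []).length = M := hsh'.2 i hi
        refine ⟨by rw [hcnt], ?_, ?_, ?_⟩
        · refine ⟨by simpa using hsh'.1, fun r hr => ?_⟩
          rw [pvGetD_modify]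
          split_ifs with h2
          · rw [pvMarkH_length]
            rcases h2 with ⟨h2, -⟩
            rw [h2]
            exact hsh'.2 i hi
          · exact hsh'.2 r hr
        · intro r c hri
          unfold pvVisAt
          rw [pvGetD_modify, if_neg (by tauto)]
          exact hoth' r c hri
        · intro c
          unfold pvVisAt
          rw [pvGetD_modify, if_pos ⟨rfl, hiN⟩]
          rw [pvMarkH_getD floor M i j _ hrowlen c]
          have hold := hrow' c
          unfold pvVisAt at hold
          rw [hold, pvCovH_succ]
          constructor
          · rintro (⟨hcM, hcv⟩ | ⟨hjc, hcM, hr⟩)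
            · exact ⟨hcM, Or.inl hcv⟩
            · exact ⟨hcM, Or.inr ⟨hjc, hr⟩⟩
          · rintro ⟨hcM, hcv | ⟨hjc, hr⟩⟩
            · exact Or.inl ⟨hcM, hcv⟩
            · exact Or.inr ⟨hjc, hcM, hr⟩
    · -- not a '-' cell: neither program does anything
      rw [if_neg (by tauto), if_neg (by tauto)]
      refine ⟨hcnt, hsh', hoth', fun c => ?_⟩
      rw [hrow' c, pvCovH_succ]
      constructor
      · rintro ⟨hcM, hcv⟩; exact ⟨hcM, Or.inl hcv⟩
      · rintro ⟨hcM, hcv | ⟨hjc, hr⟩⟩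
        · exact ⟨hcM, hcv⟩
        · exact absurd (hr j (le_refl j) hjc) hc

-- the whole horizontal pass
lemma pvHPass (floor : List String) (N M : Nat) (a : Int) (i : Nat) (hi : i ≤ N) :
    ((List.range i).foldl (fun st r => (List.range M).foldl (pvHStep floor M r) st)
        (a, (List.range N).map (fun _ => List.replicate M false))).1
        = (List.range i).foldl (fun acc r => (List.range M).foldl
            (fun x j => if pvCell floor r j = '-' ∧ (j = 0 ∨ pvCell floor r (j - 1) ≠ '-') then x + 1 else x) acc) a
      ∧ pvShape N M ((List.range i).foldl (fun st r => (List.range M).foldl (pvHStep floor M r) st)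
          (a, (List.range N).map (fun _ => List.replicate M false))).2
      ∧ (∀ r c, pvVisAt ((List.range i).foldl (fun st r => (List.range M).foldl (pvHStep floor M r) st)
          (a, (List.range N).map (fun _ => List.replicate M false))).2 r c = true ↔ (r < i ∧ c < M ∧ pvCell floor r c = '-')) := by
  induction i with
  | zero =>
    simp only [List.range_zero, List.foldl_nil]
    have hrowget : ∀ r, r < N → ((List.range N).map (fun _ => List.replicate M false)).getD r [] = List.replicate M false := by
      intro r hr
      rw [List.getD_eq_getElem?_getD, List.getElem?_map, List.getElem?_range hr]
      rfl
    refine ⟨by trivial, ⟨by simp, fun r hr => by rw [hrowget r hr]; simp⟩, fun r c => ?_⟩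
    have hz : pvVisAt ((List.range N).map (fun _ => List.replicate M false)) r c = false := by
      unfold pvVisAt
      rcases Nat.lt_or_ge r N with h | h
      · rw [hrowget r h]
        rcases Nat.lt_or_ge c M with h2 | h2
        · rw [List.getD_replicate _ h2]
        · rw [List.getD_eq_getElem?_getD, List.getElem?_eq_none (by simpa using h2)]
          rfl
      · have h1 : ((List.range N).map (fun _ => List.replicate M false)).getD r [] = [] := by
          rw [List.getD_eq_getElem?_getD, List.getElem?_eq_none (by simpa using h)]; rfl
        rw [h1]
        rfl
    rw [hz]
    simp only [Bool.false_eq_true, false_iff]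
    rintro ⟨h, -, -⟩
    omega
  | succ i ih =>
    obtain ⟨hcnt, hsh', hchar⟩ := ih (by omega)
    simp only [List.range_succ, List.foldl_append, List.foldl_cons, List.foldl_nil]
    set st := (List.range i).foldl (fun st r => (List.range M).foldl (pvHStep floor M r) st)
      (a, (List.range N).map (fun _ => List.replicate M false)) with hstdef
    have hiN : i < N := by omega
    have hrow0 : ∀ c, pvVisAt st.2 i c = false := by
      intro c
      cases h : pvVisAt st.2 i c
      · rfl
      · exact absurd ((hchar i c).mp h) (by omega)
    obtain ⟨hc2, hs2, ho2, hr2⟩ := pvHInner floor N M i hiN M (le_refl M) st.1 st.2 hsh'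
      (fun r c _ => hchar r c) hrow0
    rw [Prod.mk.eta] at hc2 hs2 ho2 hr2
    refine ⟨by rw [hc2, hcnt], hs2, fun r c => ?_⟩
    by_cases hri : r = i
    · subst hri
      rw [hr2 c]
      constructor
      · rintro ⟨hcM, hcov⟩
        exact ⟨by omega, hcM, (pvCovH_total floor r M c hcM).mp hcov⟩
      · rintro ⟨-, hcM, hcell⟩
        exact ⟨hcM, (pvCovH_total floor r M c hcM).mpr hcell⟩
    · rw [ho2 r c hri]
      constructor <;> rintro ⟨h1, h2, h3⟩ <;> exact ⟨by omega, h2, h3⟩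

-- the vertical inner loop over row i
lemma pvVInner (floor : List String) (N M i : Nat) (hi : i < N) (j : Nat) (hj : j ≤ M)
    (a : Int) (vis : List (List Bool)) (hsh : pvShape N M vis)
    (hch : ∀ r c, pvVisAt vis r c = true ↔ (r < N ∧ c < M ∧ (pvCell floor r c = '-' ∨ pvCovV floor i 0 r c))) :
    ((List.range j).foldl (pvVStep floor N i) (a, vis)).1
        = (List.range j).foldl (fun x t => if pvCell floor i t = '|' ∧ (i = 0 ∨ pvCell floor (i - 1) t ≠ '|') then x + 1 else x) a
      ∧ pvShape N M ((List.range j).foldl (pvVStep floor N i) (a, vis)).2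
      ∧ (∀ r c, pvVisAt ((List.range j).foldl (pvVStep floor N i) (a, vis)).2 r c = true ↔ (r < N ∧ c < M ∧ (pvCell floor r c = '-' ∨ pvCovV floor i j r c))) := by
  induction j with
  | zero =>
    simp only [List.range_zero, List.foldl_nil]
    exact ⟨by trivial, hsh, hch⟩
  | succ j ih =>
    obtain ⟨hcnt', hsh', hch'⟩ := ih (by omega)
    simp only [List.range_succ, List.foldl_append, List.foldl_cons, List.foldl_nil]
    set st := (List.range j).foldl (pvVStep floor N i) (a, vis) with hstdef
    have hjM : j < M := by omega
    rw [pvVStep]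
    by_cases hc : pvCell floor i j = '|'
    · have hdash : pvCell floor i j ≠ '-' := by rw [hc]; decide
      have hvis_iff : pvVisAt st.2 i j = true ↔ pvCovV floor i j i j := by
        rw [hch' i j]
        constructor
        · rintro ⟨-, -, hd | hcov⟩
          · exact absurd hd hdash
          · exact hcov
        · intro hcov
          exact ⟨hi, hjM, Or.inr hcov⟩
      by_cases hv : pvVisAt st.2 i j = true
      · have hcov := hvis_iff.mp hv
        have hself := (pvCovV_self floor i j).mp hcov
        rw [if_neg (fun hcond => absurd hv hcond.1)]
        rw [if_neg (by rintro ⟨-, h0 | hne⟩ <;> first | omega | exact hne hself.2.1)]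
        refine ⟨hcnt', hsh', fun r c => ?_⟩
        rw [hch' r c]
        constructor
        · rintro ⟨h1, h2, hd | hcv⟩
          · exact ⟨h1, h2, Or.inl hd⟩
          · exact ⟨h1, h2, Or.inr ((pvCovV_succ floor i j r c).mpr (Or.inl hcv))⟩
        · rintro ⟨h1, h2, hd | hcv⟩
          · exact ⟨h1, h2, Or.inl hd⟩
          · rcases (pvCovV_succ floor i j r c).mp hcv with hcv' | ⟨hcj, hir, hr⟩
            · exact ⟨h1, h2, Or.inr hcv'⟩
            · subst hcj
              exact ⟨h1, h2, Or.inr (pvCovV_absorb floor i c r hcov hir hr)⟩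
      · have hncov : ¬ pvCovV floor i j i j := fun h => hv (hvis_iff.mpr h)
        have hstart : i = 0 ∨ pvCell floor (i - 1) j ≠ '|' := by
          by_cases h0 : i = 0
          · exact Or.inl h0
          · refine Or.inr fun hprev => hncov ((pvCovV_self floor i j).mpr ⟨by omega, hprev, hc⟩)
        rw [if_pos (show ¬ (st.2.getD i []).getD j false = true ∧ pvCell floor i j = '|' from ⟨hv, hc⟩),
          if_pos ⟨hc, hstart⟩]
        refine ⟨by rw [hcnt'], pvMarkV_shape floor N M j i st.2 hsh', fun r c => ?_⟩
        rw [pvMarkV_visAt floor N M j hjM i st.2 hsh' r c, hch' r c]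
        constructor
        · rintro (⟨h1, h2, hd | hcv⟩ | ⟨hcj, hir, hrN, hr⟩)
          · exact ⟨h1, h2, Or.inl hd⟩
          · exact ⟨h1, h2, Or.inr ((pvCovV_succ floor i j r c).mpr (Or.inl hcv))⟩
          · exact ⟨hrN, by omega, Or.inr ((pvCovV_succ floor i j r c).mpr (Or.inr ⟨hcj, hir, hr⟩))⟩
        · rintro ⟨h1, h2, hd | hcv⟩
          · exact Or.inl ⟨h1, h2, Or.inl hd⟩
          · rcases (pvCovV_succ floor i j r c).mp hcv with hcv' | ⟨hcj, hir, hr⟩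
            · exact Or.inl ⟨h1, h2, Or.inr hcv'⟩
            · exact Or.inr ⟨hcj, hir, h1, hr⟩
    · rw [if_neg (by rintro ⟨-, h⟩; exact hc h), if_neg (by rintro ⟨h, -⟩; exact hc h)]
      refine ⟨hcnt', hsh', fun r c => ?_⟩
      rw [hch' r c]
      constructor
      · rintro ⟨h1, h2, hd | hcv⟩
        · exact ⟨h1, h2, Or.inl hd⟩
        · exact ⟨h1, h2, Or.inr ((pvCovV_succ floor i j r c).mpr (Or.inl hcv))⟩
      · rintro ⟨h1, h2, hd | hcv⟩
        · exact ⟨h1, h2, Or.inl hd⟩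
        · rcases (pvCovV_succ floor i j r c).mp hcv with hcv' | ⟨hcj, hir, hr⟩
          · exact ⟨h1, h2, Or.inr hcv'⟩
          · exact absurd (hr i (le_refl i) hir) hc

-- the whole vertical pass
lemma pvVPass (floor : List String) (N M : Nat) (a : Int) (vis : List (List Bool))
    (hsh : pvShape N M vis)
    (hch : ∀ r c, pvVisAt vis r c = true ↔ (r < N ∧ c < M ∧ pvCell floor r c = '-'))
    (i : Nat) (hi : i ≤ N) :
    ((List.range i).foldl (fun st r => (List.range M).foldl (pvVStep floor N r) st) (a, vis)).1
        = (List.range i).foldl (fun acc r => (List.range M).foldl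
            (fun x j => if pvCell floor r j = '|' ∧ (r = 0 ∨ pvCell floor (r - 1) j ≠ '|') then x + 1 else x) acc) a
      ∧ pvShape N M ((List.range i).foldl (fun st r => (List.range M).foldl (pvVStep floor N r) st) (a, vis)).2
      ∧ (∀ r c, pvVisAt ((List.range i).foldl (fun st r => (List.range M).foldl (pvVStep floor N r) st) (a, vis)).2 r c = true ↔ (r < N ∧ c < M ∧ (pvCell floor r c = '-' ∨ pvCovV floor i 0 r c))) := by
  induction i with
  | zero =>
    simp only [List.range_zero, List.foldl_nil]
    refine ⟨by trivial, hsh, fun r c => ?_⟩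
    rw [hch r c]
    constructor
    · rintro ⟨h1, h2, h3⟩
      exact ⟨h1, h2, Or.inl h3⟩
    · rintro ⟨h1, h2, hd | hcv⟩
      · exact ⟨h1, h2, hd⟩
      · exact absurd hcv (pvCovV_zero floor r c)
  | succ i ih =>
    obtain ⟨hcnt, hsh', hch'⟩ := ih (by omega)
    simp only [List.range_succ, List.foldl_append, List.foldl_cons, List.foldl_nil]
    set st := (List.range i).foldl (fun st r => (List.range M).foldl (pvVStep floor N r) st) (a, vis) with hstdef
    have hiN : i < N := by omega
    obtain ⟨hc2, hs2, hv2⟩ := pvVInner floor N M i hiN M (le_refl M) st.1 st.2 hsh' hch'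
    rw [Prod.mk.eta] at hc2 hs2 hv2
    refine ⟨by rw [hc2, hcnt], hs2, fun r c => ?_⟩
    rw [hv2 r c]
    constructor
    · rintro ⟨h1, h2, hd | hcv⟩
      · exact ⟨h1, h2, Or.inl hd⟩
      · exact ⟨h1, h2, Or.inr ((pvCovV_rollover floor i M r c h2).mp hcv)⟩
    · rintro ⟨h1, h2, hd | hcv⟩
      · exact ⟨h1, h2, Or.inl hd⟩
      · exact ⟨h1, h2, Or.inr ((pvCovV_rollover floor i M r c h2).mpr hcv)⟩

theorem pvMain (n m : Int) (floor : List String) :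
    count_wood_panels n m floor = count_wood_panels_alt n m floor := by
  simp only [count_wood_panels, count_wood_panels_alt]
  set N := n.toNat with hN
  set M := m.toNat with hM
  obtain ⟨h1c, h1s, h1v⟩ := pvHPass floor N M 0 N (le_refl N)
  set st1 := (List.range N).foldl (fun st i => (List.range M).foldl (pvHStep floor M i) st)
    ((0 : Int), (List.range N).map (fun _ => List.replicate M false)) with hst1
  obtain ⟨h2c, -, -⟩ := pvVPass floor N M st1.1 st1.2 h1s h1v N (le_refl N)
  rw [Prod.mk.eta] at h2c
  rw [h2c]
  have hshift := pvFoldl_shift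
    (fun acc r => (List.range M).foldl
      (fun x j => if pvCell floor r j = '|' ∧ (r = 0 ∨ pvCell floor (r - 1) j ≠ '|') then x + 1 else x) acc)
    (fun a t => pvFoldl_shift
      (fun x j => if pvCell floor t j = '|' ∧ (t = 0 ∨ pvCell floor (t - 1) j ≠ '|') then x + 1 else x)
      (fun x u => by by_cases h : pvCell floor t u = '|' ∧ (t = 0 ∨ pvCell floor (t - 1) u ≠ '|') <;> simp [h])
      (List.range M) a)
    (List.range N) st1.1
  rw [hshift, h1c]

-- ===== VERDICT (by name: the statement is the Claim_ definition above) =====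
theorem count_wood_panels_spec : Claim_equal_count_wood_panels := by
  intro n m floor _ _
  unfold Spec_count_wood_panels
  exact pvMain n m floor
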